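-- pv_equiv track=rewrite | github.com/rashitig/chnobli-test | src/linking.py | remove_obsolete_abbrevs
-- ===== SOURCE A (Python) =====
-- def remove_obsolete_abbrevs(fnames: list, abbr_firstnames: list) -> list:
--     """Removes abbreviated firstnames that are already covered by full
--     firstnames.
--
--     Args:
--         fnames (list): List of firstnames
--         abbr_firstnames (list): List of abbreviated firstnames
--
--     Returns:
--         list: List of firstnames where the obsolete abbreviated firstnames
--         have been removed.
--
--     Example:
--         fnames = ["R.", "Richard"] => fnames = ["Richard"]
--     """
--     cleaned_abbr_fnames = []
--     for abbr_group in abbr_firstnames: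
--         cleaned_abbr_group = []
--         for abbr in abbr_group:
--             is_obsolete = False
--             abbr = abbr.rstrip(".")
--             for fname in fnames:
--                 if fname.startswith(abbr):
--                     is_obsolete = True
--             if not is_obsolete:
--                 cleaned_abbr_group.append(abbr + ".")
--         cleaned_abbr_fnames.append(cleaned_abbr_group)
--     return cleaned_abbr_fnames
-- ===== SOURCE B (Python) =====
-- def remove_obsolete_abbrevs(fnames: list, abbr_firstnames: list) -> list:
--     # Build the set of ALL prefixes of all full firstnames once; each
--     # abbreviation is then checked by a single hash lookup instead of a
--     # scan over fnames.
--     prefixes = set()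
--     for fname in fnames:
--         for i in range(len(fname) + 1):
--             prefixes.add(fname[:i])
--     result = []
--     for abbr_group in abbr_firstnames:
--         result.append([a.rstrip(".") + "."
--                        for a in abbr_group
--                        if a.rstrip(".") not in prefixes])
--     return result
-- ===== Notes on version B (the rewrite author's own statement) =====
-- stated objective: faster
-- what changed: B precomputes one hash set of all prefixes of all fnames and decides each abbreviation by a single set lookup, instead of A's inner startswith-scan over fnames for every abbreviation.
import Mathlib
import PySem

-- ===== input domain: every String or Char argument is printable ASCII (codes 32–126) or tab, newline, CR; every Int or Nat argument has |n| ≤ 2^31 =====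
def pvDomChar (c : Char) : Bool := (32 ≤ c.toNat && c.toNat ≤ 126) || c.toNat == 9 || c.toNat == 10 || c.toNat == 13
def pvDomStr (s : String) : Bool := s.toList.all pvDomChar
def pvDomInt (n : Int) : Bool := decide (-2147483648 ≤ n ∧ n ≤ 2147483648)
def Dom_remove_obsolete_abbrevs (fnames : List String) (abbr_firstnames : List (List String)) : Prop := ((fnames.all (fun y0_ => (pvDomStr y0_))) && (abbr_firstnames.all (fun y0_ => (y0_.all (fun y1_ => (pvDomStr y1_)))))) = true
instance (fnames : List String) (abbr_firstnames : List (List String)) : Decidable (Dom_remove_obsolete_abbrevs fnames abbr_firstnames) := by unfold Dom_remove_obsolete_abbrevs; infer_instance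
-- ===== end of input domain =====

-- B replaces A's inner scan over fnames per abbreviation by one precomputed
-- hash set of all prefixes of all fnames, queried once per abbreviation.

-- s.rstrip(".") — exact: drops exactly the trailing '.' characters (hand port; PySem has no chars-rstrip)
def pvRstripDot (s : String) : List Char :=
  ((s.toList.reverse.dropWhile (fun c => c == '.')).reverse)

-- ===== PORT A =====
def remove_obsolete_abbrevs (fnames : List String) (abbr_firstnames : List (List String)) : List (List String) :=
  abbr_firstnames.foldl (fun cleaned_abbr_fnames abbr_group =>
    let cleaned_abbr_group := abbr_group.foldl (fun cleaned_abbr_group abbr0 =>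
      let abbr := pvRstripDot abbr0
      let is_obsolete := fnames.foldl (fun is_obsolete fname =>
        if PySem.Chars.startswith fname.toList abbr then true else is_obsolete) false
      if !is_obsolete then cleaned_abbr_group ++ [String.ofList (abbr ++ ['.'])]
      else cleaned_abbr_group) []
    cleaned_abbr_fnames ++ [cleaned_abbr_group]) []

-- ===== PORT B =====
-- the set {fname[:i] | fname ∈ fnames, 0 ≤ i ≤ len(fname)}
def pvPrefixSet (fnames : List String) : PySem.Set (List Char) :=
  fnames.foldl (fun prefixes fname =>
    (PySem.List.pyRange 0 ((fname.toList.length : Int) + 1) 1).foldl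
      (fun prefixes i => PySem.Set.add prefixes (PySem.List.slice fname.toList none (some i)))
      prefixes) PySem.Set.empty

def remove_obsolete_abbrevs_alt (fnames : List String) (abbr_firstnames : List (List String)) : List (List String) :=
  let prefixes := pvPrefixSet fnames
  abbr_firstnames.map (fun abbr_group =>
    (abbr_group.filter (fun a => !(PySem.Set.contains prefixes (pvRstripDot a)))).map
      (fun a => String.ofList (pvRstripDot a ++ ['.'])))

-- ===== PRECONDITION & SPEC =====
def Spec_remove_obsolete_abbrevs (fnames : List String) (abbr_firstnames : List (List String)) (out : List (List String)) : Prop := out = remove_obsolete_abbrevs_alt fnames abbr_firstnames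
instance (fnames : List String) (abbr_firstnames : List (List String)) (out : List (List String)) : Decidable (Spec_remove_obsolete_abbrevs fnames abbr_firstnames out) := by unfold Spec_remove_obsolete_abbrevs; infer_instance

-- ===== CLAIM (what is proved, stated in full; the proofs are below) =====
def Claim_equal_remove_obsolete_abbrevs : Prop := ∀ (fnames : List String) (abbr_firstnames : List (List String)), Dom_remove_obsolete_abbrevs fnames abbr_firstnames → Spec_remove_obsolete_abbrevs fnames abbr_firstnames (remove_obsolete_abbrevs fnames abbr_firstnames)

-- ===== LEMMAS AND PROOFS =====

-- membership in an inner fold that only adds g-images of range elements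
theorem pv_mem_foldl_add {α β : Type} [BEq α] [LawfulBEq α] (l : List β) (g : β → α)
    (s : PySem.Set α) (x : α) :
    (x ∈ l.foldl (fun s y => PySem.Set.add s (g y)) s) ↔ (x ∈ s ∨ ∃ y ∈ l, x = g y) := by
  induction l generalizing s with
  | nil => simp
  | cons h t ih =>
    simp [List.foldl_cons, ih, PySem.Set.mem_add]
    tauto

-- characterisation of the prefix set
theorem pv_mem_prefixSet (fnames : List String) (x : List Char) :
    (x ∈ pvPrefixSet fnames) ↔ ∃ f ∈ fnames, x <+: f.toList := by
  unfold pvPrefixSet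
  induction fnames with
  | nil => simp [PySem.Set.empty]
  | cons f t ih =>
    rw [List.foldl_cons]
    constructor
    · intro hx
      -- peel the outer fold via a generalized membership lemma
      have gen : ∀ (rest : List String) (s : PySem.Set (List Char)),
          x ∈ rest.foldl (fun prefixes fname =>
            (PySem.List.pyRange 0 ((fname.toList.length : Int) + 1) 1).foldl
              (fun prefixes i => PySem.Set.add prefixes (PySem.List.slice fname.toList none (some i))) prefixes) s →
          x ∈ s ∨ ∃ g ∈ rest, x <+: g.toList := by
        intro rest
        induction rest with
        | nil => intro s hs; exact Or.inl hs
        | cons r rt ihr =>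
          intro s hs
          rcases ihr _ hs with h | ⟨g, hg, hp⟩
          · rw [pv_mem_foldl_add] at h
            rcases h with h | ⟨i, hi, hx⟩
            · exact Or.inl h
            · refine Or.inr ⟨r, List.mem_cons_self, ?_⟩
              rw [PySem.List.mem_pyRange_one] at hi
              obtain ⟨hi0, _⟩ := hi
              subst hx
              rw [PySem.List.slice_to _ hi0]
              exact List.take_prefix _ _
          · exact Or.inr ⟨g, List.mem_cons_of_mem _ hg, hp⟩
      rcases gen _ _ hx with h | ⟨g, hg, hp⟩
      · rw [pv_mem_foldl_add] at h
        rcases h with h | ⟨i, hi, hx'⟩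
        · simp [PySem.Set.empty] at h
        · refine ⟨f, List.mem_cons_self, ?_⟩
          rw [PySem.List.mem_pyRange_one] at hi
          subst hx'
          rw [PySem.List.slice_to _ hi.1]
          exact List.take_prefix _ _
      · exact ⟨g, List.mem_cons_of_mem _ hg, hp⟩
    · rintro ⟨g, hg, hp⟩
      -- monotonicity: folding only adds elements
      have mono : ∀ (rest : List String) (s : PySem.Set (List Char)), x ∈ s →
          x ∈ rest.foldl (fun prefixes fname =>
            (PySem.List.pyRange 0 ((fname.toList.length : Int) + 1) 1).foldl
              (fun prefixes i => PySem.Set.add prefixes (PySem.List.slice fname.toList none (some i))) prefixes) s := by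
        intro rest
        induction rest with
        | nil => exact fun s hs => hs
        | cons r rt ihr =>
          intro s hs
          exact ihr _ ((pv_mem_foldl_add _ _ _ _).2 (Or.inl hs))
      rcases List.mem_cons.1 hg with rfl | hg'
      · -- x is a prefix of f: it is added by f's inner fold
        apply mono
        rw [pv_mem_foldl_add]
        refine Or.inr ⟨(x.length : Int), ?_, ?_⟩
        · rw [PySem.List.mem_pyRange_one]
          have := hp.length_le
          omega
        · rw [PySem.List.slice_to _ (by positivity), Int.toNat_natCast]
          exact List.prefix_iff_eq_take.1 hp
      · -- x is a prefix of some later g: induction hypothesis plus monotonicity of the start set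
        have hx := ih.2 ⟨g, hg', hp⟩
        -- re-run the generalized argument with the f-fold result as the start
        have gen2 : ∀ (rest : List String) (s₁ s₂ : PySem.Set (List Char)),
            (∀ y, y ∈ s₁ → y ∈ s₂) →
            x ∈ rest.foldl (fun prefixes fname =>
              (PySem.List.pyRange 0 ((fname.toList.length : Int) + 1) 1).foldl
                (fun prefixes i => PySem.Set.add prefixes (PySem.List.slice fname.toList none (some i))) prefixes) s₁ →
            x ∈ rest.foldl (fun prefixes fname =>
              (PySem.List.pyRange 0 ((fname.toList.length : Int) + 1) 1).foldl
                (fun prefixes i => PySem.Set.add prefixes (PySem.List.slice fname.toList none (some i))) prefixes) s₂ := by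
          intro rest
          induction rest with
          | nil => intro s₁ s₂ h hx; exact h _ hx
          | cons r rt ihr =>
            intro s₁ s₂ h hx
            refine ihr _ _ ?_ hx
            intro y hy
            rw [pv_mem_foldl_add] at hy ⊢
            rcases hy with hy | hy
            · exact Or.inl (h _ hy)
            · exact Or.inr hy
        refine gen2 t PySem.Set.empty _ ?_ hx
        intro y hy
        rw [pv_mem_foldl_add]
        exact Or.inl hy

-- per-abbreviation agreement of the two obsoleteness tests
theorem pv_obsolete_eq (fnames : List String) (abbr : List Char) :
    (fnames.foldl (fun b fname => if PySem.Chars.startswith fname.toList abbr then true else b) false)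
      = PySem.Set.contains (pvPrefixSet fnames) abbr := by
  rw [PySem.List.foldl_if_true_eq]
  simp only [Bool.false_or]
  by_cases h : ∃ f ∈ fnames, abbr <+: f.toList
  · have hc : PySem.Set.contains (pvPrefixSet fnames) abbr = true := by
      simpa [PySem.Set.contains] using (pv_mem_prefixSet fnames abbr).2 h
    rw [hc]
    obtain ⟨f, hf, hp⟩ := h
    exact List.any_eq_true.2 ⟨f, hf, by rw [PySem.Chars.startswith_iff]; exact hp⟩
  · have hc : PySem.Set.contains (pvPrefixSet fnames) abbr = false := by
      by_contra hne
      have : abbr ∈ pvPrefixSet fnames := by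
        simpa [PySem.Set.contains] using Bool.of_not_eq_false hne
      exact h ((pv_mem_prefixSet fnames abbr).1 this)
    rw [hc]
    refine List.any_eq_false.2 ?_
    intro f hf
    rw [Bool.not_eq_true, ← Bool.not_eq_true, PySem.Chars.startswith_iff]
    exact fun hp => h ⟨f, hf, hp⟩

-- ===== VERDICT (by name: the statement is the Claim_ definition above) =====
theorem remove_obsolete_abbrevs_spec : Claim_equal_remove_obsolete_abbrevs := by
  intro fnames abbr_firstnames _
  unfold Spec_remove_obsolete_abbrevs remove_obsolete_abbrevs remove_obsolete_abbrevs_alt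
  rw [PySem.List.foldl_append_singleton_eq_map, List.nil_append]
  apply List.map_congr_left
  intro group _
  simp only [pv_obsolete_eq]
  rw [PySem.List.foldl_append_if
      (p := fun a => !(PySem.Set.contains (pvPrefixSet fnames) (pvRstripDot a)))
      (f := fun a => String.ofList (pvRstripDot a ++ ['.']))]
  simp
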